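-- pv_equiv track=rewrite | github.com/bdenckla/MAM-basics | py/pytmpl_survey/survey_dot.py | _build_abbreviations
-- ===== SOURCE A (Python) =====
-- def _abbreviate_name(name):
--     """Abbreviate 'first middle ... last' to 'first … last' for 3+ word names."""
--     words = name.split()
--     if len(words) <= 2:
--         return name
--     return f"{words[0]} … {words[-1]}"
--
-- def _build_abbreviations(names):
--     """Map each name to its abbreviated form, reverting to full where it would collide."""
--     raw = {name: _abbreviate_name(name) for name in names}
--     by_abbrev = {}
--     for name, abbrev in raw.items():
--         by_abbrev.setdefault(abbrev, []).append(name)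
--     for colliders in by_abbrev.values():
--         if len(colliders) > 1:
--             for name in colliders:
--                 raw[name] = name
--     return raw
-- ===== SOURCE B (Python) =====
-- def _abbreviate_name(name):
--     """Abbreviate 'first middle ... last' to 'first … last' for 3+ word names."""
--     words = name.split()
--     if len(words) <= 2:
--         return name
--     return f"{words[0]} … {words[-1]}"
--
-- def _build_abbreviations(names):
--     """Map each name to its abbreviated form, reverting to full where it would collide.
--
--     Sort-then-scan: sort the abbreviations of the distinct names and read the
--     colliding ones off adjacent equal pairs of the sorted list; no per-abbreviation
--     grouping or counting structure is built.
--     """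
--     uniq = list(dict.fromkeys(names))
--     s = sorted(_abbreviate_name(n) for n in uniq)
--     dups = {a for a, b in zip(s, s[1:]) if a == b}
--     result = {}
--     for n in uniq:
--         ab = _abbreviate_name(n)
--         result[n] = n if ab in dups else ab
--     return result
-- ===== Notes on version B (the rewrite author's own statement) =====
-- stated objective: alternative
-- what changed: A groups the names into per-abbreviation collider lists in a dict and then mutates the raw mapping over every group of size > 1; B builds no grouping structure at all: it sorts the abbreviations of the deduped names, reads the colliding abbreviations off adjacent equal pairs of the sorted list, and emits each name's entry directly.
import Mathlib
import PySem

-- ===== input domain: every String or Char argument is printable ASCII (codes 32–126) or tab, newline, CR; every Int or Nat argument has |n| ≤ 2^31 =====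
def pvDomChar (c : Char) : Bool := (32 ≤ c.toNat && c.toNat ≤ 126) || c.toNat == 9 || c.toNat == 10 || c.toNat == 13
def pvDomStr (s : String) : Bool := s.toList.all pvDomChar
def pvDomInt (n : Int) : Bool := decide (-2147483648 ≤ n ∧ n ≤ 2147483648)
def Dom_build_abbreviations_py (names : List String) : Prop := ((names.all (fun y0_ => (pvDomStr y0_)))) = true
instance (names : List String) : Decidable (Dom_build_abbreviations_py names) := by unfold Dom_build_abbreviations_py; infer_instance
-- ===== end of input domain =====

-- B replaces A's group-then-revert mutation by sort-then-scan: sort the abbreviations of the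
-- deduped names and read the colliding ones off adjacent equal pairs of the sorted list;
-- alternative algorithm, same result.

-- shared helper: _abbreviate_name (identical in Source A and Source B)
-- the headD/getLastD defaults are unreachable: the else branch has words.length > 2
def pyAbbrevName (name : String) : String :=
  let words := PySem.Str.split₀ name
  if words.length ≤ 2 then name
  else words.headD "" ++ " … " ++ words.getLastD ""

-- ===== PORT A =====
def build_abbreviations_py (names : List String) : List (String × String) :=
  let raw : PySem.Dict String String :=
    names.foldl (fun d n => d.insert n (pyAbbrevName n)) PySem.Dict.empty
  let by_abbrev : PySem.Dict String (List String) :=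
    raw.items.foldl (fun d p => d.modify p.2 [] (· ++ [p.1])) PySem.Dict.empty
  let raw2 :=
    by_abbrev.values.foldl
      (fun r colliders =>
        if 1 < colliders.length then colliders.foldl (fun r n => r.insert n n) r else r)
      raw
  raw2.items

-- ===== PORT B =====
-- list(dict.fromkeys(names)) is PySem.Set.ofList; sorted(...) is PySem.List.sorted;
-- the set comprehension over zip(s, s[1:]) is PySem.Set.ofList of the filtered zip
def build_abbreviations_py_alt (names : List String) : List (String × String) :=
  let uniq : List String := PySem.Set.ofList names
  let s : List String :=
    PySem.List.sorted (uniq.map (fun n => pyAbbrevName n)) (fun x => x) false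
  let dups : PySem.Set String :=
    PySem.Set.ofList
      (((s.zip (PySem.List.slice s (some 1) none)).filter (fun p => p.1 == p.2)).map (·.1))
  (uniq.foldl
      (fun r n =>
        let ab := pyAbbrevName n
        r.insert n (if PySem.Set.contains dups ab then n else ab))
      (PySem.Dict.empty : PySem.Dict String String)).items

-- ===== PRECONDITION & SPEC =====
def Spec_build_abbreviations_py (names : List String) (out : List (String × String)) : Prop := out = build_abbreviations_py_alt names
instance (names : List String) (out : List (String × String)) : Decidable (Spec_build_abbreviations_py names out) := by unfold Spec_build_abbreviations_py; infer_instance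

-- ===== CLAIM (what is proved, stated in full; the proofs are below) =====
def Claim_equal_build_abbreviations_py : Prop := ∀ (names : List String), Dom_build_abbreviations_py names → Spec_build_abbreviations_py names (build_abbreviations_py names)

-- ===== LEMMAS AND PROOFS =====

-- A's inner revert loop: inserting (n, n) for every n in L, all already keys of d,
-- rewrites the items list in place.
lemma ins_loop (L : List String) (d : PySem.Dict String String)
    (h : ∀ n ∈ L, d.contains n = true) :
    (L.foldl (fun r n => r.insert n n) d).items
      = d.items.map (fun p => if p.1 ∈ L then (p.1, p.1) else p) := by
  induction L generalizing d with
  | nil => simp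
  | cons n L ih =>
    simp only [List.foldl_cons]
    rw [ih _ (fun m hm => by
      rw [PySem.Dict.contains_insert]
      simp [h m (List.mem_cons_of_mem _ hm)])]
    rw [PySem.Dict.items_insert_of_contains d n (h n (List.mem_cons_self ..)), List.map_map]
    apply List.map_congr_left
    intro p _
    by_cases hpn : p.1 = n
    · simp [hpn]
    · simp only [Function.comp_apply, beq_iff_eq, hpn, if_false]
      by_cases hL : p.1 ∈ L <;> simp [hL, hpn]

-- A's outer revert loop over a list C of abbreviations, in closed form.
lemma outer_loop (raw : PySem.Dict String String) (hnd : raw.keys.Nodup) (C : List String) :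
    (C.foldl
        (fun r c =>
          if 1 < ((raw.items.filter (fun q => q.2 == c)).map (·.1)).length then
            ((raw.items.filter (fun q => q.2 == c)).map (·.1)).foldl (fun r n => r.insert n n) r
          else r)
        raw).items
      = raw.items.map (fun p =>
          if p.2 ∈ C ∧ 1 < (raw.items.filter (fun q => q.2 == p.2)).length then (p.1, p.1) else p) := by
  induction C using List.reverseRecOn with
  | nil => simp
  | append_singleton C c ih =>
    rw [List.foldl_append, List.foldl_cons, List.foldl_nil]
    set g := (raw.items.filter (fun q => q.2 == c)).map (·.1) with hg
    have hkeep : ∀ p ∈ raw.items,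
        ((fun p => if p.2 ∈ C ∧ 1 < (raw.items.filter (fun q => q.2 == p.2)).length
                   then (p.1, p.1) else p) p).1 = p.1 := by
      intro p _; by_cases h : p.2 ∈ C ∧ 1 < (raw.items.filter (fun q => q.2 == p.2)).length <;> simp [h]
    have hmemg : ∀ p ∈ raw.items, (p.1 ∈ g ↔ p.2 = c) := by
      intro p hp
      constructor
      · intro h1
        rcases List.mem_map.mp h1 with ⟨q, hqf, hq1⟩
        have hq := List.mem_filter.mp hqf
        have e1 : raw.get? p.1 = some p.2 := PySem.Dict.get?_of_mem_items raw hp hnd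
        have e2 : raw.get? q.1 = some q.2 := PySem.Dict.get?_of_mem_items raw hq.1 hnd
        rw [hq1] at e2
        have : p.2 = q.2 := Option.some.inj (e1.symm.trans e2)
        rw [this]; exact beq_iff_eq.mp hq.2
      · intro h2
        exact List.mem_map.mpr ⟨p, List.mem_filter.mpr ⟨hp, beq_iff_eq.mpr h2⟩, rfl⟩
    by_cases hbig : 1 < g.length
    · rw [if_pos hbig, ins_loop, ih, List.map_map]
      · apply List.map_congr_left
        intro p hp
        simp only [Function.comp_apply]
        by_cases hC : p.2 ∈ C ∧ 1 < (raw.items.filter (fun q => q.2 == p.2)).length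
        · have : (p.1, p.1).1 ∈ g ∨ ¬ (p.1, p.1).1 ∈ g := em _
          simp only [hC]
          have hcond : p.2 ∈ C ++ [c] ∧ 1 < (raw.items.filter (fun q => q.2 == p.2)).length :=
            ⟨List.mem_append_left _ hC.1, hC.2⟩
          by_cases hgm : p.1 ∈ g <;> simp [hgm, hcond]
        · simp only [hC, if_false]
          by_cases hgm : p.1 ∈ g
          · have hpc : p.2 = c := (hmemg p hp).mp hgm
            have hcond : p.2 ∈ C ++ [c] ∧ 1 < (raw.items.filter (fun q => q.2 == p.2)).length := by
              constructor
              · exact List.mem_append_right _ (by simp [hpc])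
              · rw [hpc]; simpa [hg, List.length_map] using hbig
            simp [hgm, hcond]
          · have hpc : p.2 ≠ c := fun h => hgm ((hmemg p hp).mpr h)
            have hcond : ¬ (p.2 ∈ C ++ [c] ∧ 1 < (raw.items.filter (fun q => q.2 == p.2)).length) := by
              intro ⟨h1, h2⟩
              rcases List.mem_append.mp h1 with h1 | h1
              · exact hC ⟨h1, h2⟩
              · exact hpc (by simpa using h1)
            simp only [if_neg hgm, if_neg hcond]
      · intro n hn
        rcases List.mem_map.mp hn with ⟨q, hqf, hq1⟩
        have hq := (List.mem_filter.mp hqf).1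
        have hk : n ∈ (C.foldl
            (fun r c =>
              if 1 < ((raw.items.filter (fun q => q.2 == c)).map (·.1)).length then
                ((raw.items.filter (fun q => q.2 == c)).map (·.1)).foldl (fun r n => r.insert n n) r
              else r) raw).keys := by
          simp only [PySem.Dict.keys, ih, List.map_map]
          refine List.mem_map.mpr ⟨q, hq, ?_⟩
          rw [Function.comp_apply, hkeep q hq, hq1]
        exact (PySem.Dict.contains_iff_mem_keys _ _).mpr hk
    · rw [if_neg hbig, ih]
      apply List.map_congr_left
      intro p hp
      by_cases hC : p.2 ∈ C ∧ 1 < (raw.items.filter (fun q => q.2 == p.2)).length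
      · have : p.2 ∈ C ++ [c] ∧ _ := ⟨List.mem_append_left _ hC.1, hC.2⟩
        simp [hC, this]
      · have hcond : ¬ (p.2 ∈ C ++ [c] ∧ 1 < (raw.items.filter (fun q => q.2 == p.2)).length) := by
          intro ⟨h1, h2⟩
          rcases List.mem_append.mp h1 with h1 | h1
          · exact hC ⟨h1, h2⟩
          · have hpc : p.2 = c := by simpa using h1
            apply hbig; rw [hg, List.length_map, ← hpc]; exact h2
        rw [if_neg hC, if_neg hcond]

-- A's raw dict: since the inserted value depends only on the key, duplicate re-inserts
-- overwrite with the same value and the items are the deduped names paired with their abbrevs.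
lemma raw_items (names : List String) :
    (names.foldl (fun d n => d.insert n (pyAbbrevName n)) PySem.Dict.empty).items
      = (PySem.Set.ofList names).map (fun n => (n, pyAbbrevName n)) := by
  induction names using List.reverseRecOn with
  | nil => simp [PySem.Dict.empty, PySem.Set.ofList]
  | append_singleton names n ih =>
    rw [List.foldl_append, List.foldl_cons, List.foldl_nil,
      PySem.Dict.items_insert, ih, PySem.Set.ofList_append_singleton]
    have hkeys : (names.foldl (fun d n => d.insert n (pyAbbrevName n)) PySem.Dict.empty).contains n
        = decide (n ∈ PySem.Set.ofList names) := by
      rw [PySem.Dict.contains_eq_decide_mem_keys]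
      simp only [PySem.Dict.keys, ih, List.map_map]
      simp [Function.comp_def]
    rw [hkeys]
    by_cases hm : n ∈ PySem.Set.ofList names
    · rw [if_pos (by simp [hm])]
      have hadd : PySem.Set.add (PySem.Set.ofList names) n = PySem.Set.ofList names := by
        simp [PySem.Set.add, PySem.Set.contains, hm]
      rw [hadd, List.map_map]
      apply List.map_congr_left
      intro m hmem
      by_cases hmn : m = n
      · subst hmn; simp
      · simp [hmn]
    · rw [if_neg (by simp [hm])]
      have hadd : PySem.Set.add (PySem.Set.ofList names) n = PySem.Set.ofList names ++ [n] := by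
        simp [PySem.Set.add, PySem.Set.contains, hm]
      rw [hadd]; simp

-- In a (≤)-sorted list, an element occurs more than once iff it appears as an
-- adjacent equal pair; its first component list is exactly the duplicated elements.
lemma adj_dup_iff (S : List String) (hS : S.Pairwise (· ≤ ·)) (x : String) :
    x ∈ ((S.zip S.tail).filter (fun p => p.1 == p.2)).map (·.1) ↔ 1 < S.count x := by
  induction S with
  | nil => simp
  | cons a t ih =>
    cases t with
    | nil => simp [List.count_cons]; split <;> simp
    | cons b t' =>
      have hat : (b :: t').Pairwise (· ≤ ·) := List.Pairwise.of_cons hS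
      have hle : ∀ y ∈ b :: t', a ≤ y := fun y hy => List.rel_of_pairwise_cons hS hy
      have hble : ∀ y ∈ t', b ≤ y := fun y hy => List.rel_of_pairwise_cons hat hy
      have ih' := ih hat
      simp only [List.tail_cons, List.zip_cons_cons] at ih' ⊢
      constructor
      · intro hmem
        rcases List.mem_map.mp hmem with ⟨p, hpf, hp1⟩
        rcases List.mem_filter.mp hpf with ⟨hpz, hpe⟩
        rcases List.mem_cons.mp hpz with hpab | hprest
        · have hab : a = b := by rw [hpab] at hpe; exact beq_iff_eq.mp hpe
          have hxa : x = a := by rw [hpab] at hp1; exact hp1.symm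
          subst hxa; subst hab
          simp
        · have hx : x ∈ (((b :: t').zip t').filter (fun p => p.1 == p.2)).map (·.1) :=
            List.mem_map.mpr ⟨p, List.mem_filter.mpr ⟨hprest, hpe⟩, hp1⟩
          have h1 : 1 < (b :: t').count x := ih'.mp hx
          rw [List.count_cons]
          split <;> omega
      · intro hcnt
        by_cases hxt : 1 < (b :: t').count x
        · rcases List.mem_map.mp (ih'.mpr hxt) with ⟨p, hpf, hp1⟩
          rcases List.mem_filter.mp hpf with ⟨hpz, hpe⟩
          exact List.mem_map.mpr
            ⟨p, List.mem_filter.mpr ⟨List.mem_cons_of_mem _ hpz, hpe⟩, hp1⟩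
        · rw [List.count_cons] at hcnt
          by_cases hax : (a == x) = true
          · have haxe : a = x := beq_iff_eq.mp hax
            have hxmem : x ∈ b :: t' := by
              rw [if_pos hax] at hcnt
              have h0 : 0 < (b :: t').count x := by omega
              exact List.count_pos_iff.mp h0
            have hbx : b = x := by
              rcases List.mem_cons.mp hxmem with h | h
              · exact h.symm
              · exact le_antisymm (hble x h) (haxe ▸ hle b (List.mem_cons_self ..))
            refine List.mem_map.mpr
              ⟨(a, b), List.mem_filter.mpr ⟨List.mem_cons_self .., ?_⟩, haxe⟩
            exact beq_iff_eq.mpr (haxe.trans hbx.symm)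
          · rw [if_neg hax] at hcnt
            omega

-- ===== VERDICT (by name: the statement is the Claim_ definition above) =====
theorem build_abbreviations_py_spec : Claim_equal_build_abbreviations_py := by
  intro names _
  unfold Spec_build_abbreviations_py build_abbreviations_py build_abbreviations_py_alt
  set raw : PySem.Dict String String :=
    names.foldl (fun d n => d.insert n (pyAbbrevName n)) PySem.Dict.empty with hraw
  have hnd : raw.keys.Nodup :=
    PySem.Dict.nodup_keys_foldl_insert names (fun d n => pyAbbrevName n) PySem.Dict.empty
      (by simp)
  -- step 1: the grouping dict, in closed form
  have hgrp : ∀ c, ((raw.items.foldl (fun d p => d.modify p.2 [] (· ++ [p.1]))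
      (PySem.Dict.empty : PySem.Dict String (List String))).getD c [])
      = (raw.items.filter (fun q => q.2 == c)).map (·.1) := by
    intro c
    rw [show (raw.items.foldl (fun d p => d.modify p.2 [] (· ++ [p.1]))
          (PySem.Dict.empty : PySem.Dict String (List String)))
        = ((raw.items.map (fun p => (p.2, p.1))).foldl
            (fun d p => d.modify p.1 [] (· ++ [p.2])) PySem.Dict.empty) from by
      rw [List.foldl_map]]
    rw [PySem.Dict.getD_foldl_modify_append]
    simp [List.filter_map, List.map_map, Function.comp_def]
  have hgk : (raw.items.foldl (fun d p => d.modify p.2 [] (· ++ [p.1]))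
      (PySem.Dict.empty : PySem.Dict String (List String))).keys
      = PySem.Set.ofList (raw.items.map (·.2)) := by
    rw [show (fun (d : PySem.Dict String (List String)) (p : String × String) =>
          d.modify p.2 [] (· ++ [p.1]))
        = (fun d p => d.modify ((·.2) p) [] ((fun _ q => (· ++ [q.1])) d p)) from rfl]
    rw [PySem.Dict.keys_foldl_modify_key]
    simp [PySem.Set.ofList_eq_foldl, PySem.Set.update]
  have hgnd : (raw.items.foldl (fun d p => d.modify p.2 [] (· ++ [p.1]))
      (PySem.Dict.empty : PySem.Dict String (List String))).keys.Nodup := by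
    rw [hgk]; exact PySem.Set.nodup_ofList _
  -- step 2: A's result in closed form
  have hA : (((raw.items.foldl (fun d p => d.modify p.2 [] (· ++ [p.1]))
        (PySem.Dict.empty : PySem.Dict String (List String))).values).foldl
      (fun r colliders =>
        if 1 < colliders.length then colliders.foldl (fun r n => r.insert n n) r else r)
      raw).items
      = raw.items.map (fun p =>
          if p.2 ∈ PySem.Set.ofList (raw.items.map (·.2))
              ∧ 1 < (raw.items.filter (fun q => q.2 == p.2)).length
          then (p.1, p.1) else p) := by
    rw [PySem.Dict.values_eq_map_keys _ hgnd [], hgk]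
    rw [show (List.map (fun c => ((raw.items.foldl (fun d p => d.modify p.2 [] (· ++ [p.1]))
          (PySem.Dict.empty : PySem.Dict String (List String))).getD c []))
          (PySem.Set.ofList (raw.items.map (·.2))))
        = List.map (fun c => (raw.items.filter (fun q => q.2 == c)).map (·.1))
          (PySem.Set.ofList (raw.items.map (·.2))) from
      List.map_congr_left (fun c _ => hgrp c)]
    rw [List.foldl_map]
    exact outer_loop raw hnd _
  rw [hA]
  -- step 3: B's result in closed form
  have hndu : (PySem.Set.ofList names).Nodup := PySem.Set.nodup_ofList _
  set S : List String :=
    PySem.List.sorted ((PySem.Set.ofList names).map (fun n => pyAbbrevName n)) (fun x => x) false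
    with hSdef
  set D : PySem.Set String :=
    PySem.Set.ofList
      (((S.zip (PySem.List.slice S (some 1) none)).filter (fun p => p.1 == p.2)).map (·.1))
    with hDdef
  have hB : ((PySem.Set.ofList names).foldl
        (fun r n =>
          let ab := pyAbbrevName n
          r.insert n (if PySem.Set.contains D ab then n else ab))
        (PySem.Dict.empty : PySem.Dict String String)).items
      = (PySem.Set.ofList names).map (fun n =>
          (n, if PySem.Set.contains D (pyAbbrevName n) then n else pyAbbrevName n)) := by
    rw [show (fun (r : PySem.Dict String String) (n : String) =>
          let ab := pyAbbrevName n
          r.insert n (if PySem.Set.contains D ab then n else ab))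
        = (fun r n => r.insert ((fun (a : String) => a) n)
            ((fun n => if PySem.Set.contains D (pyAbbrevName n) then n
                       else pyAbbrevName n) n)) from rfl]
    rw [PySem.Dict.items_foldl_insert_fresh (PySem.Set.ofList names) (fun a => a) _
      PySem.Dict.empty (fun a _ => PySem.Dict.contains_empty _) (by simp)]
    simp [PySem.Dict.empty]
  rw [hB]
  -- step 4: both sides as maps over the deduped names; pointwise agreement
  rw [raw_items, List.map_map]
  have hS : S.Pairwise (· ≤ ·) :=
    PySem.List.sorted_pairwise ((PySem.Set.ofList names).map (fun n => pyAbbrevName n)) (fun x => x)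
  have hperm : S.Perm ((PySem.Set.ofList names).map (fun n => pyAbbrevName n)) :=
    PySem.List.sorted_perm _ _ _
  apply List.map_congr_left
  intro n hn
  have hmemv : pyAbbrevName n
      ∈ PySem.Set.ofList (((PySem.Set.ofList names).map fun n => (n, pyAbbrevName n)).map (·.2)) := by
    rw [PySem.Set.mem_ofList, List.map_map]
    exact List.mem_map.mpr ⟨n, hn, rfl⟩
  have hcount : (((PySem.Set.ofList names).map fun n => (n, pyAbbrevName n)).filter
        (fun q => q.2 == pyAbbrevName n)).length
      = S.count (pyAbbrevName n) := by
    rw [hperm.count_eq]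
    simp [List.filter_map, List.count, List.countP_map, ← List.countP_eq_length_filter,
      Function.comp_def]
  have htail : PySem.List.slice S (some 1) none = S.tail := PySem.List.slice_from_one S
  have hiff : 1 < (((PySem.Set.ofList names).map fun n => (n, pyAbbrevName n)).filter
        (fun q => q.2 == pyAbbrevName n)).length
      ↔ PySem.Set.contains D (pyAbbrevName n) = true := by
    rw [hcount, hDdef, htail]
    rw [show (PySem.Set.contains
          (PySem.Set.ofList (((S.zip S.tail).filter (fun p => p.1 == p.2)).map (·.1)))
          (pyAbbrevName n) = true)
        ↔ pyAbbrevName n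
            ∈ (((S.zip S.tail).filter (fun p => p.1 == p.2)).map (·.1)) from by
      simp [PySem.Set.contains]]
    exact (adj_dup_iff S hS (pyAbbrevName n)).symm
  simp only [Function.comp_apply]
  by_cases hc : PySem.Set.contains D (pyAbbrevName n) = true
  · rw [if_pos ⟨hmemv, hiff.mpr hc⟩, if_pos hc]
  · rw [if_neg (fun h => hc (hiff.mp h.2)), if_neg hc]
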